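-- pv_equiv track=rewrite | github.com/kimmarumoe/LDA-AI-SERVER | app/routers/guide.py | _normalize_brick_types
-- ===== SOURCE A (Python) =====
-- from typing import Any, List, Optional, Tuple
--
-- ALLOWED_BRICK_TYPES = {
--     "1x1", "1x2", "1x3", "1x4", "1x5",
--     "2x2", "2x3", "2x4", "2x5",
-- }
--
-- def _dedupe_preserve_order(items: List[str]) -> List[str]:
--     seen = set()
--     out: List[str] = []
--     for x in items:
--         if x not in seen:
--             out.append(x)
--             seen.add(x)
--     return out
--
-- def _normalize_brick_types(bt: Optional[List[str]]) -> Optional[List[str]]: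
--     if not bt:
--         return None
--
--     cleaned = [x.strip() for x in bt if isinstance(x, str) and x.strip()]
--     cleaned = _dedupe_preserve_order(cleaned)
--
--     cleaned = [x for x in cleaned if x in ALLOWED_BRICK_TYPES]
--     if not cleaned:
--         return None
--
--     if "1x1" not in cleaned:
--         cleaned = ["1x1"] + cleaned
--
--     return cleaned
-- ===== SOURCE B (Python) =====
-- ALLOWED_BRICK_TYPES = {
--     "1x1", "1x2", "1x3", "1x4", "1x5",
--     "2x2", "2x3", "2x4", "2x5",
-- }
--
-- _ALLOWED_LIST = ["1x1", "1x2", "1x3", "1x4", "1x5", "2x2", "2x3", "2x4", "2x5"]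
--
-- def _first_pos(bt, t):
--     """Index of the first element of bt whose stripped form equals t, else None."""
--     for i, x in enumerate(bt):
--         if isinstance(x, str) and x.strip() == t:
--             return i
--     return None
--
-- def _normalize_brick_types(bt):
--     if not bt:
--         return None
--     found = []
--     for t in _ALLOWED_LIST:
--         p = _first_pos(bt, t)
--         if p is not None:
--             found.append((p, t))
--     found.sort()
--     out = [t for _, t in found]
--     if not out:
--         return None
--     return out if "1x1" in out else ["1x1"] + out
-- ===== Notes on version B (the rewrite author's own statement) =====
-- stated objective: alternative
-- what changed: Inverts the iteration: instead of A's clean/strip pass, dedupe-with-seen-set pass and allowed-filter pass over the input, B scans once per each of the nine fixed allowed types for its first occurrence index in the input and sorts the found types by that index; no seen set and no dedupe exist in B.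
import Mathlib
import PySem

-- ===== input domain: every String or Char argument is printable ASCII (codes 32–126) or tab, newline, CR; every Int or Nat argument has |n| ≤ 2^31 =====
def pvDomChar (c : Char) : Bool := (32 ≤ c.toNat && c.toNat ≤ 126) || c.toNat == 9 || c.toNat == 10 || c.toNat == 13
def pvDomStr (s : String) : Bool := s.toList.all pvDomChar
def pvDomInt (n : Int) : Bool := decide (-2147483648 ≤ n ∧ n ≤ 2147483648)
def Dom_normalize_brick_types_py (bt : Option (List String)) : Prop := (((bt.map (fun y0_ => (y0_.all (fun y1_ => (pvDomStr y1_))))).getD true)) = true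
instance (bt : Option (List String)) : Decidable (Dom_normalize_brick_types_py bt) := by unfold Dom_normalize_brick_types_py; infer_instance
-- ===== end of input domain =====

-- B replaces A's clean/dedupe/filter pipeline over the input by the inverted algorithm: for each of the
-- nine fixed allowed types, find its first occurrence index in the input, then sort the found types by
-- that index; objective: alternative (same O(n) cost, constant allowed set).

-- ALLOWED_BRICK_TYPES (shared module constant; A uses it as a set, B's helper list spells the same nine types)
def pvAllowedList : List String := ["1x1", "1x2", "1x3", "1x4", "1x5", "2x2", "2x3", "2x4", "2x5"]
def pvAllowed : PySem.Set String := PySem.Set.ofList pvAllowedList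

-- ===== PORT A =====
-- _dedupe_preserve_order: loop carrying the seen set, building out front-to-back
def dedupe_preserve_order_py (seen : PySem.Set String) : List String → List String
  | [] => []
  | x :: rest =>
    if PySem.Set.contains seen x then dedupe_preserve_order_py seen rest
    else x :: dedupe_preserve_order_py (PySem.Set.add seen x) rest

def normalize_brick_types_py (bt : Option (List String)) : Option (List String) :=
  match bt with
  | none => none
  | some l =>
    if l = [] then none  -- 'if not bt'
    else
      -- [x.strip() for x in bt if isinstance(x, str) and x.strip()]
      let cleaned := (l.filter (fun x => PySem.Str.strip x ≠ "")).map PySem.Str.strip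
      let cleaned := dedupe_preserve_order_py PySem.Set.empty cleaned
      let cleaned := cleaned.filter (fun x => PySem.Set.contains pvAllowed x)
      if cleaned = [] then none
      else if cleaned.contains "1x1" then some cleaned
      else some ("1x1" :: cleaned)

-- ===== PORT B =====
-- _first_pos: scan bt with a running index for the first element stripping to t
def first_pos_alt (t : String) : List String → Nat → Option Nat
  | [], _ => none
  | x :: r, i => if PySem.Str.strip x = t then some i else first_pos_alt t r (i + 1)

def normalize_brick_types_py_alt (bt : Option (List String)) : Option (List String) :=
  match bt with
  | none => none
  | some l =>
    if l = [] then none  -- 'if not bt'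
    else
      -- for t in _ALLOWED_LIST: p = _first_pos(bt, t); if p is not None: found.append((p, t))
      let found := pvAllowedList.foldl (fun acc t =>
        match first_pos_alt t l 0 with
        | some p => acc ++ [(p, t)]
        | none => acc) ([] : List (Nat × String))
      -- found.sort()  (tuples compare lexicographically)
      let fsorted := PySem.List.sorted2 found (fun q => q.1) (fun q => q.2) false
      let out := fsorted.map (fun q => q.2)
      if out = [] then none
      else if out.contains "1x1" then some out
      else some ("1x1" :: out)

-- ===== PRECONDITION & SPEC =====
def Spec_normalize_brick_types_py (bt : Option (List String)) (out : Option (List String)) : Prop := out = normalize_brick_types_py_alt bt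
instance (bt : Option (List String)) (out : Option (List String)) : Decidable (Spec_normalize_brick_types_py bt out) := by unfold Spec_normalize_brick_types_py; infer_instance

-- ===== CLAIM (what is proved, stated in full; the proofs are below) =====
def Claim_equal_normalize_brick_types_py : Prop := ∀ (bt : Option (List String)), Dom_normalize_brick_types_py bt → Spec_normalize_brick_types_py bt (normalize_brick_types_py bt)

-- ===== LEMMAS AND PROOFS =====

-- proof-only reference loop: one pass over l emitting each allowed stripped value at its first occurrence
def canonLoop (seen : PySem.Set String) : List String → List String
  | [] => []
  | x :: rest =>
    let s := PySem.Str.strip x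
    if s ≠ "" ∧ PySem.Set.contains pvAllowed s = true ∧ ¬ PySem.Set.contains seen s = true then
      s :: canonLoop (PySem.Set.add seen s) rest
    else canonLoop seen rest

-- A's three passes collapse to canonLoop, provided the two seen sets agree on allowed strings
theorem dedupe_filter_eq_canon (l : List String) :
    ∀ (seenA seenB : PySem.Set String),
    (∀ s, s ∈ pvAllowed → (s ∈ seenA ↔ s ∈ seenB)) →
    ((dedupe_preserve_order_py seenA
        ((l.filter (fun x => PySem.Str.strip x ≠ "")).map PySem.Str.strip)).filter
      (fun x => PySem.Set.contains pvAllowed x))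
    = canonLoop seenB l := by
  induction l with
  | nil => intro seenA seenB _; simp [dedupe_preserve_order_py, canonLoop]
  | cons x rest ih =>
    intro seenA seenB hinv
    by_cases hs : PySem.Str.strip x = ""
    · simp only [List.filter_cons, hs, ne_eq, not_true_eq_false, decide_false, canonLoop]
      simpa [hs] using ih seenA seenB hinv
    · simp only [List.filter_cons, hs, ne_eq, not_false_eq_true, decide_true, if_true,
        List.map_cons, canonLoop, dedupe_preserve_order_py]
      by_cases hA : PySem.Str.strip x ∈ seenA
      · by_cases hal : PySem.Str.strip x ∈ pvAllowed
        · have hB : PySem.Str.strip x ∈ seenB := (hinv _ hal).mp hA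
          simpa [hA, hB, hal] using ih seenA seenB hinv
        · simpa [hA, hal] using ih seenA seenB hinv
      · by_cases hal : PySem.Str.strip x ∈ pvAllowed
        · have hB : PySem.Str.strip x ∉ seenB := fun h => hA ((hinv _ hal).mpr h)
          have hrec := ih (PySem.Set.add seenA (PySem.Str.strip x))
            (PySem.Set.add seenB (PySem.Str.strip x)) (by
              intro s hsal
              rw [PySem.Set.mem_add, PySem.Set.mem_add, hinv s hsal])
          simpa [hA, hB, hal, hs] using hrec
        · have hrec := ih (PySem.Set.add seenA (PySem.Str.strip x)) seenB (by
            intro s hsal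
            rw [PySem.Set.mem_add, hinv s hsal]
            have hne : s ≠ PySem.Str.strip x := fun h => hal (h ▸ hsal)
            simp [hne])
          simpa [hA, hal] using hrec

-- membership in canonLoop
theorem mem_canonLoop (l : List String) : ∀ (seen : PySem.Set String) (s : String),
    s ∈ canonLoop seen l ↔ (s ∈ pvAllowed ∧ s ∉ seen ∧ ∃ x ∈ l, PySem.Str.strip x = s) := by
  induction l with
  | nil => intro seen s; simp [canonLoop]
  | cons x rest ih =>
    intro seen s
    simp only [canonLoop]
    by_cases hg : PySem.Str.strip x ≠ "" ∧ PySem.Set.contains pvAllowed (PySem.Str.strip x) = true ∧ ¬ PySem.Set.contains seen (PySem.Str.strip x) = true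
    · rw [if_pos hg]
      obtain ⟨hne, hal, hsn⟩ := hg
      rw [PySem.Set.contains_iff] at hal
      rw [PySem.Set.contains_iff] at hsn
      constructor
      · intro hm
        rcases List.mem_cons.mp hm with rfl | hm
        · exact ⟨hal, hsn, x, List.mem_cons_self .., rfl⟩
        · obtain ⟨h1, h2, y, hy, hys⟩ := (ih _ s).mp hm
          rw [PySem.Set.mem_add] at h2
          push Not at h2
          exact ⟨h1, h2.1, y, List.mem_cons_of_mem _ hy, hys⟩
      · rintro ⟨h1, h2, y, hy, rfl⟩
        rcases List.mem_cons.mp hy with rfl | hy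
        · exact List.mem_cons_self ..
        · by_cases hx : PySem.Str.strip y = PySem.Str.strip x
          · rw [hx]; exact List.mem_cons_self ..
          · refine List.mem_cons_of_mem _ ((ih _ _).mpr ⟨h1, ?_, y, hy, rfl⟩)
            rw [PySem.Set.mem_add]
            push Not
            exact ⟨h2, hx⟩
    · rw [if_neg hg]
      rw [ih]
      constructor
      · rintro ⟨h1, h2, y, hy, rfl⟩
        exact ⟨h1, h2, y, List.mem_cons_of_mem _ hy, rfl⟩
      · rintro ⟨h1, h2, y, hy, rfl⟩
        rcases List.mem_cons.mp hy with rfl | hy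
        · exfalso
          apply hg
          have hemp : PySem.Str.strip y ≠ "" := by
            intro h0
            have : ("" : String) ∉ pvAllowed := by decide
            exact this (h0 ▸ h1)
          refine ⟨hemp, (PySem.Set.contains_iff ..).mpr h1, ?_⟩
          rw [PySem.Set.contains_iff]
          exact h2
        · exact ⟨h1, h2, y, hy, rfl⟩

theorem nodup_canonLoop (l : List String) : ∀ (seen : PySem.Set String),
    (canonLoop seen l).Nodup := by
  induction l with
  | nil => intro seen; simp [canonLoop]
  | cons x rest ih =>
    intro seen
    simp only [canonLoop]
    split_ifs with hg
    · refine List.nodup_cons.mpr ⟨?_, ih _⟩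
      intro hm
      obtain ⟨_, h2, _⟩ := (mem_canonLoop _ _ _).mp hm
      exact h2 ((PySem.Set.mem_add ..).mpr (Or.inr rfl))
    · exact ih _

theorem pairwise_canonLoop (l : List String) : ∀ (seen : PySem.Set String),
    (canonLoop seen l).Pairwise (fun a b =>
      l.findIdx (fun x => PySem.Str.strip x == a) < l.findIdx (fun x => PySem.Str.strip x == b)) := by
  induction l with
  | nil => intro seen; simp [canonLoop]
  | cons x rest ih =>
    intro seen
    simp only [canonLoop]
    split_ifs with hg
    · refine List.pairwise_cons.mpr ⟨?_, ?_⟩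
      · intro u hu
        have hne : u ≠ PySem.Str.strip x := by
          obtain ⟨_, h2, _⟩ := (mem_canonLoop _ _ _).mp hu
          intro h
          exact h2 ((PySem.Set.mem_add ..).mpr (Or.inr h))
        rw [List.findIdx_cons, List.findIdx_cons]
        have h2 : (PySem.Str.strip x == u) = false := by simp [Ne.symm hne]
        simp [h2]
      · refine (ih _).imp_of_mem ?_
        intro a b ha hb hlt
        have hna : (PySem.Str.strip x == a) = false := by
          obtain ⟨_, h2, _⟩ := (mem_canonLoop _ _ _).mp ha
          have : a ≠ PySem.Str.strip x := fun h => h2 ((PySem.Set.mem_add ..).mpr (Or.inr h))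
          simp [Ne.symm this]
        have hnb : (PySem.Str.strip x == b) = false := by
          obtain ⟨_, h2, _⟩ := (mem_canonLoop _ _ _).mp hb
          have : b ≠ PySem.Str.strip x := fun h => h2 ((PySem.Set.mem_add ..).mpr (Or.inr h))
          simp [Ne.symm this]
        rw [List.findIdx_cons, List.findIdx_cons]
        simp only [hna, hnb, cond_false]
        omega
    · refine (ih _).imp_of_mem ?_
      intro a b ha hb hlt
      have key : ∀ c ∈ canonLoop seen rest, (PySem.Str.strip x == c) = false := by
        intro c hc
        obtain ⟨h1, h2, _⟩ := (mem_canonLoop _ _ _).mp hc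
        have hcx : PySem.Str.strip x ≠ c := by
          intro h
          apply hg
          have hemp : PySem.Str.strip x ≠ "" := by
            intro h0
            have : ("" : String) ∉ pvAllowed := by decide
            exact this (h0 ▸ h ▸ h1)
          refine ⟨hemp, (PySem.Set.contains_iff ..).mpr (h ▸ h1), ?_⟩
          rw [PySem.Set.contains_iff]
          exact h ▸ h2
        simp [hcx]
      rw [List.findIdx_cons, List.findIdx_cons]
      simp only [key a ha, key b hb, cond_false]
      omega

theorem first_pos_alt_eq (t : String) (l : List String) : ∀ (i : Nat),
    first_pos_alt t l i = if l.any (fun x => PySem.Str.strip x == t)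
      then some (i + l.findIdx (fun x => PySem.Str.strip x == t)) else none := by
  induction l with
  | nil => intro i; simp [first_pos_alt]
  | cons x r ih =>
    intro i
    by_cases hx : PySem.Str.strip x = t
    · simp [first_pos_alt, hx, List.findIdx_cons]
    · have hxb : (PySem.Str.strip x == t) = false := by simp [hx]
      simp only [first_pos_alt, hx, if_false, ih (i + 1), List.any_cons, hxb,
        Bool.false_or, List.findIdx_cons, cond_false]
      split_ifs
      · congr 1
        omega
      · rfl

theorem insertBy_congr {α : Type} (b1 b2 : α → α → Bool) (x : α) : ∀ (ys : List α),
    (∀ y ∈ ys, b1 x y = b2 x y) →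
    PySem.List.insertBy b1 x ys = PySem.List.insertBy b2 x ys := by
  intro ys
  induction ys with
  | nil => intro _; rfl
  | cons y ys ih =>
    intro h
    simp only [PySem.List.insertBy]
    rw [h y (List.mem_cons_self ..)]
    split_ifs
    · rfl
    · rw [ih (fun z hz => h z (List.mem_cons_of_mem _ hz))]

theorem foldl_insertBy_congr {α : Type} (b1 b2 : α → α → Bool) : ∀ (xs acc : List α),
    (∀ x ∈ xs, ∀ y, (y ∈ acc ∨ y ∈ xs) → b1 x y = b2 x y) →
    xs.foldl (fun acc x => PySem.List.insertBy b1 x acc) acc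
      = xs.foldl (fun acc x => PySem.List.insertBy b2 x acc) acc := by
  intro xs
  induction xs with
  | nil => intro acc _; rfl
  | cons x xs ih =>
    intro acc h
    simp only [List.foldl_cons]
    rw [insertBy_congr b1 b2 x acc (fun y hy => h x (List.mem_cons_self ..) y (Or.inl hy))]
    apply ih
    intro z hz y hy
    apply h z (List.mem_cons_of_mem _ hz)
    rcases hy with hy | hy
    · rcases (PySem.List.mem_insertBy ..).mp hy with rfl | hy
      · exact Or.inr (List.mem_cons_self ..)
      · exact Or.inl hy
    · exact Or.inr (List.mem_cons_of_mem _ hy)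

-- B's insertion sort with the tuple key equals the fst-key sort when fst determines the pair
theorem sorted2_eq_sorted_fst (xs : List (Nat × String))
    (h : ∀ p ∈ xs, ∀ q ∈ xs, p.1 = q.1 → p = q) :
    PySem.List.sorted2 xs (fun q => q.1) (fun q => q.2) false
      = PySem.List.sorted xs (fun q => q.1) false := by
  rw [PySem.List.sorted_eq_foldl_insertBy]
  simp only [PySem.List.sorted2, Bool.false_eq_true, if_false]
  apply foldl_insertBy_congr
  intro p hp y hy
  have hy' : y ∈ xs := by
    rcases hy with hy | hy
    · exact absurd hy (List.not_mem_nil)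
    · exact hy
  by_cases hq : p.1 = y.1
  · have : p = y := h p hp y hy' hq
    subst this
    simp
  · rcases Nat.lt_or_ge p.1 y.1 with h1 | h1
    · simp [h1]
    · have h2 : y.1 < p.1 := by omega
      have h3 : ¬ p.1 < y.1 := by omega
      simp [h2, h3]

-- the central list identity: B's sorted found-list projects to canonLoop
theorem blist_eq_canon (l : List String) :
    ((PySem.List.sorted2
        (pvAllowedList.foldl (fun acc t =>
          match first_pos_alt t l 0 with
          | some p => acc ++ [(p, t)]
          | none => acc) ([] : List (Nat × String)))
        (fun q => q.1) (fun q => q.2) false).map (fun q => q.2))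
      = canonLoop PySem.Set.empty l := by
  have hfound : (pvAllowedList.foldl (fun acc t =>
        match first_pos_alt t l 0 with
        | some p => acc ++ [(p, t)]
        | none => acc) ([] : List (Nat × String)))
      = ((pvAllowedList.filter (fun t => l.any (fun x => PySem.Str.strip x == t))).map
          (fun t => (l.findIdx (fun x => PySem.Str.strip x == t), t))) := by
    rw [PySem.List.foldl_congr_mem _ _
      (fun acc t => if l.any (fun x => PySem.Str.strip x == t)
        then acc ++ [(l.findIdx (fun x => PySem.Str.strip x == t), t)] else acc) _
      (by
        intro acc t _
        rw [first_pos_alt_eq]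
        by_cases hc : (l.any fun x => PySem.Str.strip x == t) = true
        · simp only [if_pos hc, Nat.zero_add]
        · simp only [if_neg hc])]
    rw [PySem.List.foldl_append_if]
    rfl
  have hdist : ∀ p ∈ ((pvAllowedList.filter (fun t => l.any (fun x => PySem.Str.strip x == t))).map
          (fun t => (l.findIdx (fun x => PySem.Str.strip x == t), t))),
      ∀ q ∈ ((pvAllowedList.filter (fun t => l.any (fun x => PySem.Str.strip x == t))).map
          (fun t => (l.findIdx (fun x => PySem.Str.strip x == t), t))), p.1 = q.1 → p = q := by
    rintro p hp q hq h1
    simp only [List.mem_map, List.mem_filter] at hp hq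
    obtain ⟨s, ⟨_, hsany⟩, rfl⟩ := hp
    obtain ⟨u, ⟨_, huany⟩, rfl⟩ := hq
    simp only at h1
    have hls : l.findIdx (fun x => PySem.Str.strip x == s) < l.length :=
      List.findIdx_lt_length.mpr (List.any_eq_true.mp hsany)
    have hlu : l.findIdx (fun x => PySem.Str.strip x == u) < l.length :=
      List.findIdx_lt_length.mpr (List.any_eq_true.mp huany)
    have hgs := @List.findIdx_getElem _ (fun x => PySem.Str.strip x == s) l hls
    have hgu := @List.findIdx_getElem _ (fun x => PySem.Str.strip x == u) l hlu
    rw [beq_iff_eq] at hgs hgu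
    have hidx := getElem_congr (rfl : l = l) h1 hls
    have : s = u := by rw [← hgs, hidx, hgu]
    subst this
    rfl
  rw [hfound, sorted2_eq_sorted_fst _ hdist]
  have hperm : ((canonLoop PySem.Set.empty l).map
        (fun s => (l.findIdx (fun x => PySem.Str.strip x == s), s))).Perm
      ((pvAllowedList.filter (fun t => l.any (fun x => PySem.Str.strip x == t))).map
        (fun t => (l.findIdx (fun x => PySem.Str.strip x == t), t))) := by
    apply List.Perm.map
    rw [List.perm_ext_iff_of_nodup (nodup_canonLoop l _)
      ((by decide : pvAllowedList.Nodup).filter _)]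
    intro a
    rw [mem_canonLoop, List.mem_filter]
    constructor
    · rintro ⟨h1, _, y, hy, rfl⟩
      refine ⟨(PySem.Set.mem_ofList ..).mp h1, List.any_eq_true.mpr ⟨y, hy, by simp⟩⟩
    · rintro ⟨h1, h2⟩
      obtain ⟨y, hy, hys⟩ := List.any_eq_true.mp h2
      rw [beq_iff_eq] at hys
      exact ⟨(PySem.Set.mem_ofList ..).mpr h1, by simp [PySem.Set.empty], y, hy, hys⟩
  have hpair : ((canonLoop PySem.Set.empty l).map
        (fun s => (l.findIdx (fun x => PySem.Str.strip x == s), s))).Pairwise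
      (fun p q => p.1 < q.1) := by
    rw [List.pairwise_map]
    exact pairwise_canonLoop l _
  rw [PySem.List.sorted_eq_of_perm_of_pairwise_lt _ _ _ hperm hpair]
  rw [List.map_map]
  simp [Function.comp_def]

-- ===== VERDICT (by name: the statement is the Claim_ definition above) =====
theorem normalize_brick_types_py_spec : Claim_equal_normalize_brick_types_py := by
  intro bt _
  unfold Spec_normalize_brick_types_py normalize_brick_types_py normalize_brick_types_py_alt
  match bt with
  | none => rfl
  | some l =>
    simp only
    by_cases h : l = []
    · simp [h]
    · simp only [h, if_false]
      rw [blist_eq_canon l,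
        dedupe_filter_eq_canon l PySem.Set.empty PySem.Set.empty (fun _ _ => Iff.rfl)]
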